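-- pv_equiv track=rewrite | github.com/noonaut-homo-lumen-resonans/homo-lumen-compendiums | ama-backend/ama_project/src/core/lira_hub_filter.py | _is_code_content
-- ===== SOURCE A (Python) =====
-- def _is_code_content(text: str) -> bool:
--     """Detect if content contains code."""
--     # Check for code indicators
--     code_indicators = [
--         '```',  # Markdown code blocks
--         'def ',  # Python functions
--         'class ',  # Classes
--         'import ',  # Imports
--         '{',  # Curly braces (JS, JSON)
--         'const ',  # JS constants
--         'function(',  # JS functions
--     ]
--
--     return any(indicator in text for indicator in code_indicators)
-- ===== SOURCE B (Python) =====
-- _INDICATORS = ('```', 'def ', 'class ', 'import ', '{', 'const ', 'function(')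
--
--
-- def _is_code_content(text: str) -> bool:
--     """Detect if content contains code: single left-to-right pass over the text,
--     checking at each position whether any indicator starts there."""
--     for i in range(len(text)):
--         for ind in _INDICATORS:
--             if text.startswith(ind, i):
--                 return True
--     return False
-- ===== Notes on version B (the rewrite author's own statement) =====
-- stated objective: alternative
-- what changed: Replaces seven independent whole-text substring membership scans, one per indicator, with a single position-major left-to-right pass that checks at each position whether any of the seven indicators starts there.
import Mathlib
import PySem

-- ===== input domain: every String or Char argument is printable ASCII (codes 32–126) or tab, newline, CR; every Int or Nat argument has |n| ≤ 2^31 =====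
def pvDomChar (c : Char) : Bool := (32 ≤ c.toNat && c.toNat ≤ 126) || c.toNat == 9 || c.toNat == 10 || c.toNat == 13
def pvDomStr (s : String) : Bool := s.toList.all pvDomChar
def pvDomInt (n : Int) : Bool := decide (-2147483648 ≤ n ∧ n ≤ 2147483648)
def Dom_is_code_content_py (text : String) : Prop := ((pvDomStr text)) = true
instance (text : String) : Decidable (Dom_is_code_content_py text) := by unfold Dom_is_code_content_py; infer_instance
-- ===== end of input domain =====

-- B replaces seven whole-text substring scans with one position-major left-to-right pass (alternative decomposition, same detected set).

-- ===== PORT A =====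
def pvCodeIndicators : List String :=
  ["```", "def ", "class ", "import ", "{", "const ", "function("]

def is_code_content_py (text : String) : Bool :=
  pvCodeIndicators.any (fun indicator => PySem.Str.isIn indicator text)

-- ===== PORT B =====
-- the inner 'for ind in _INDICATORS: if text.startswith(ind, i)'
def pvAnyStartsHere (l : List Char) : Bool :=
  pvCodeIndicators.any (fun ind => ind.toList.isPrefixOf l)

-- the outer 'for i in range(len(text))': recursion over successive suffixes
def pvScan : List Char → Bool
  | [] => false
  | c :: t => if pvAnyStartsHere (c :: t) then true else pvScan t

def is_code_content_py_alt (text : String) : Bool :=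
  pvScan text.toList

-- ===== PRECONDITION & SPEC =====
def Spec_is_code_content_py (text : String) (out : Bool) : Prop := out = is_code_content_py_alt text
instance (text : String) (out : Bool) : Decidable (Spec_is_code_content_py text out) := by unfold Spec_is_code_content_py; infer_instance

-- ===== CLAIM (what is proved, stated in full; the proofs are below) =====
def Claim_equal_is_code_content_py : Prop := ∀ (text : String), Dom_is_code_content_py text → Spec_is_code_content_py text (is_code_content_py text)

-- ===== LEMMAS AND PROOFS =====

-- pvScan finds exactly the infix occurrences of the (all nonempty) indicators
theorem pvScan_eq_any_infix (l : List Char) :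
    pvScan l = pvCodeIndicators.any (fun ind => decide (ind.toList <:+: l)) := by
  induction l with
  | nil => decide
  | cons c t ih =>
      rw [pvScan, ih]
      by_cases h : pvAnyStartsHere (c :: t) = true
      · simp only [h, if_true]
        rcases List.any_eq_true.mp h with ⟨ind, hmem, hpre⟩
        symm
        refine List.any_eq_true.mpr ⟨ind, hmem, ?_⟩
        exact decide_eq_true ((List.isPrefixOf_iff_prefix.mp hpre).isInfix)
      · simp only [h]
        simp only [Bool.false_eq_true, if_false]
        rw [Bool.eq_iff_iff]
        simp only [List.any_eq_true] at h ⊢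
        constructor
        · rintro ⟨ind, hmem, hinf⟩
          have hi : ind.toList <:+: t := of_decide_eq_true hinf
          exact ⟨ind, hmem, decide_eq_true (List.infix_cons hi)⟩
        · rintro ⟨ind, hmem, hinf⟩
          rcases (List.infix_cons_iff.mp (of_decide_eq_true hinf)) with hp | hi
          · exact absurd (List.any_eq_true.mpr
              ⟨ind, hmem, List.isPrefixOf_iff_prefix.mpr hp⟩) h
          · exact ⟨ind, hmem, decide_eq_true hi⟩

-- ===== VERDICT (by name: the statement is the Claim_ definition above) =====
theorem is_code_content_py_spec : Claim_equal_is_code_content_py := by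
  intro text _
  unfold Spec_is_code_content_py is_code_content_py is_code_content_py_alt
  rw [pvScan_eq_any_infix]
  congr 1
  funext ind
  by_cases h : ind.toList <:+: text.toList
  · simp [h, (PySem.Chars.isIn_iff_infix _ _).mpr h]
  · simp only [h, decide_false]
    exact Bool.eq_false_iff.mpr (fun hc => h ((PySem.Chars.isIn_iff_infix _ _).mp hc))
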